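-- pv_equiv track=rewrite | github.com/societe-generale/aikit | aikit/future/graph/_convert.py | _create_name_mapping
-- ===== SOURCE A (Python) =====
-- def _create_name_mapping(all_nodes):
--     """ Helper function to create the name of the nodes within a GraphPipeline model.
--         - if no ambiguities, name of node will be the name of the model
--         - otherwise, name of node will be '%s_%s' % (name_of_step, name_of_model)
--
--     Parameters
--     ----------
--     all_nodes : list of 2-tuple
--         nodes of graph : (step_name, model_name)
--
--     Returns
--     -------
--     dictionary with key = node, and value : string corresponding to the node
--     """
--     count_by_model_name = {}
--     mapping = {}
--     done = set()
--     for step_name, model_name in all_nodes: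
--         if (step_name, model_name) in done:
--             raise ValueError("I have a duplicate node %s" % str((step_name, model_name)))
--         done.add((step_name, model_name))
--         count_by_model_name[model_name[1]] = count_by_model_name.get(model_name[1], 0) + 1
--
--     for step_name, model_name in all_nodes:
--         if count_by_model_name[model_name[1]] > 1:
--             mapping[(step_name, model_name)] = f"{model_name[0]}_{model_name[1]}"
--         else:
--             mapping[(step_name, model_name)] = model_name[1]
--
--     count_by_name = {}
--     for k, v in mapping.items():
--         count_by_name[k] = count_by_model_name.get(k, 0) + 1
--     for k, v in count_by_name.items():
--         if v > 1:
--             raise ValueError(f"Found duplicate name for node {k}")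
--
--     return mapping
-- ===== SOURCE B (Python) =====
-- def _create_name_mapping(all_nodes):
--     """One-pass variant: instead of pre-counting model names and then naming
--     every node in a second sweep, name each node optimistically with its bare
--     model name and retroactively re-name the first holder when its model name
--     turns out to be ambiguous (dict overwrite keeps the insertion position)."""
--     mapping = {}
--     first_of = {}  # model_name[1] -> first node seen with that key, None once ambiguous
--     for node in all_nodes:
--         if node in mapping:
--             raise ValueError("I have a duplicate node %s" % str(node))
--         step_name, model_name = node
--         key = model_name[1]
--         if key not in first_of:
--             first_of[key] = node
--             mapping[node] = key
--         else:
--             prev = first_of[key]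
--             if prev is not None:
--                 mapping[prev] = f"{prev[1][0]}_{prev[1][1]}"
--                 first_of[key] = None
--             mapping[node] = f"{model_name[0]}_{model_name[1]}"
--     return mapping
-- ===== Notes on version B (the rewrite author's own statement) =====
-- stated objective: alternative
-- what changed: Replaces A's two sweeps (first count model names in a dict, then a second full pass naming every node, plus a dead duplicate-name check) by a single pass that names each node with its bare model name and, via a first-holder dict, retroactively renames the first node of a model name the moment that name becomes ambiguous (dict overwrite keeps its position).
import Mathlib
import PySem

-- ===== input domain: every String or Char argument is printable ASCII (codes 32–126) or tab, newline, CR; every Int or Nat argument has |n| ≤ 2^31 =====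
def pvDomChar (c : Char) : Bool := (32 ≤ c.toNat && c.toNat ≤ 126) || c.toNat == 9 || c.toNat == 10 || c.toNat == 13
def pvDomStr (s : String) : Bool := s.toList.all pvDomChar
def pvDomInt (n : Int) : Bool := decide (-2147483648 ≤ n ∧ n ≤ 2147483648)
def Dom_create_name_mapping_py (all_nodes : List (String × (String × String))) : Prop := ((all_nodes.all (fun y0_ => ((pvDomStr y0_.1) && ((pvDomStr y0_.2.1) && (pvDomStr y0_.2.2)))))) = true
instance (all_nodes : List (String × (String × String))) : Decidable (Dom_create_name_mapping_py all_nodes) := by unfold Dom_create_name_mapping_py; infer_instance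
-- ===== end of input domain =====

-- B replaces A's two sweeps (count model names, then name every node) by one pass that
-- names each node optimistically and retroactively renames the first holder of a model
-- name when it becomes ambiguous; equivalence is about the returned mapping (no mutation).

-- ===== PORT A =====
-- Port of `_create_name_mapping`. The ValueError on a duplicate node is excluded by
-- Pre_ (the port keeps the `done` set the loop maintains but cannot raise).
def create_name_mapping_py (all_nodes : List (String × (String × String))) : List (String × (String × String) × String) :=
  -- first loop: build `done` and `count_by_model_name` (the two states are independent)
  let _done : PySem.Set (String × (String × String)) :=
    all_nodes.foldl (fun d p => PySem.Set.add d p) []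
  let count_by_model_name : PySem.Dict String Int :=
    all_nodes.foldl (fun d p => d.insert p.2.2 (d.getD p.2.2 0 + 1)) PySem.Dict.empty
  -- second loop
  let mapping : PySem.Dict (String × (String × String)) String :=
    all_nodes.foldl (fun m p =>
      if count_by_model_name.getD p.2.2 0 > 1 then
        m.insert p (p.2.1 ++ "_" ++ p.2.2)
      else
        m.insert p p.2.2) PySem.Dict.empty
  -- third loop: `count_by_model_name.get(k, 0)` looks a NODE tuple up in a dict keyed
  -- by strings, so it always yields the default 0 and every `count_by_name` value is
  -- 0 + 1 = 1 (exact); its `v > 1` ValueError can therefore never fire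
  let _count_by_name : PySem.Dict (String × (String × String)) Int :=
    mapping.items.foldl (fun d kv => d.insert kv.1 (0 + 1)) PySem.Dict.empty
  -- dict item ((step, model), name) is flattened to (step, (model, name)) per the type convention
  mapping.items.map (fun kv => (kv.1.1, kv.1.2, kv.2))

-- ===== PORT B =====
-- Port of Source B. The `node in mapping` ValueError on a duplicate is excluded by Pre_.
def create_name_mapping_py_alt (all_nodes : List (String × (String × String))) : List (String × (String × String) × String) :=
  let st :=
    all_nodes.foldl
      (fun (st : PySem.Dict (String × (String × String)) String ×
                 PySem.Dict String (Option (String × (String × String)))) p =>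
        let mapping := st.1
        let first_of := st.2
        let key := p.2.2
        match first_of.get? key with
        | none => (mapping.insert p key, first_of.insert key (some p))
        | some (some prev) =>
            ((mapping.insert prev (prev.2.1 ++ "_" ++ prev.2.2)).insert p
               (p.2.1 ++ "_" ++ p.2.2),
             first_of.insert key none)
        | some none => (mapping.insert p (p.2.1 ++ "_" ++ p.2.2), first_of))
      (PySem.Dict.empty, PySem.Dict.empty)
  -- dict item ((step, model), name) is flattened to (step, (model, name)) per the type convention
  st.1.items.map (fun kv => (kv.1.1, kv.1.2, kv.2))

-- ===== PRECONDITION & SPEC =====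
-- Pre_ excludes exactly the lists with a repeated node, on which the Python A raises
-- ValueError (and so does B).
def Pre_create_name_mapping_py (all_nodes : List (String × (String × String))) : Prop :=
  all_nodes.Nodup
instance (all_nodes : List (String × (String × String))) : Decidable (Pre_create_name_mapping_py all_nodes) := by unfold Pre_create_name_mapping_py; infer_instance

def pvWitness_create_name_mapping_py : (List (String × (String × String))) :=
  [("s1", ("m1", "lr")), ("s2", ("m2", "lr")), ("s3", ("m3", "pca"))]

def Spec_create_name_mapping_py (all_nodes : List (String × (String × String))) (out : List (String × (String × String) × String)) : Prop := out = create_name_mapping_py_alt all_nodes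
instance (all_nodes : List (String × (String × String))) (out : List (String × (String × String) × String)) : Decidable (Spec_create_name_mapping_py all_nodes out) := by unfold Spec_create_name_mapping_py; infer_instance

-- ===== CLAIM (what is proved, stated in full; the proofs are below) =====
def Claim_equal_create_name_mapping_py : Prop := ∀ (all_nodes : List (String × (String × String))), Dom_create_name_mapping_py all_nodes → Pre_create_name_mapping_py all_nodes → Spec_create_name_mapping_py all_nodes (create_name_mapping_py all_nodes)

-- ===== LEMMAS AND PROOFS =====

-- the final name of node q relative to a node list L
def pvName (L : List (String × (String × String))) (q : String × (String × String)) : String :=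
  if 2 ≤ (L.filter (fun r => r.2.2 == q.2.2)).length then q.2.1 ++ "_" ++ q.2.2 else q.2.2

-- the contents of B's `first_of` at key k after processing `pre`
def pvFState (pre : List (String × (String × String))) (k : String) :
    Option (Option (String × (String × String))) :=
  let f := pre.filter (fun r => r.2.2 == k)
  if f.length = 0 then none else if f.length = 1 then some f[0]? else some none

lemma pvName_stable (pre : List (String × (String × String))) (p q : String × (String × String))
    (h : ¬ q.2.2 = p.2.2) : pvName (pre ++ [p]) q = pvName pre q := by
  unfold pvName
  have : (p.2.2 == q.2.2) = false := by simp; exact fun e => h e.symm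
  simp [List.filter_append, this]

lemma pvFState_stable (pre : List (String × (String × String))) (p : String × (String × String))
    (k : String) (h : ¬ p.2.2 = k) : pvFState (pre ++ [p]) k = pvFState pre k := by
  unfold pvFState
  have hb : (p.2.2 == k) = false := by simpa using h
  have hf : List.filter (fun r => r.2.2 == k) (pre ++ [p])
      = List.filter (fun r => r.2.2 == k) pre := by simp [List.filter_append, hb]
  rw [hf]

lemma items_foldl_insert_fun {α β : Type} [BEq α] [LawfulBEq α]
    (l : List α) (f : α → β) (d : PySem.Dict α β)
    (h : ∀ p ∈ l, d.contains p = false) (hnd : l.Nodup) :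
    (l.foldl (fun m p => m.insert p (f p)) d).items
      = d.items ++ l.map (fun p => (p, f p)) := by
  induction l generalizing d with
  | nil => simp
  | cons p t ih =>
    have hp := h p (by simp)
    rw [List.foldl_cons, ih (d.insert p (f p))
      (by
        intro q hq
        rw [PySem.Dict.contains_insert]
        have hne : q ≠ p := by rintro rfl; exact (List.nodup_cons.mp hnd).1 hq
        simp [hne, h q (by simp [hq])])
      (List.nodup_cons.mp hnd).2]
    rw [PySem.Dict.items_insert_of_not_contains d (f p) hp]
    simp

lemma a_counts (all_nodes : List (String × (String × String))) (v : String) :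
    (all_nodes.foldl (fun d p => d.insert p.2.2 (d.getD p.2.2 0 + 1)) PySem.Dict.empty).getD v 0
      = ((all_nodes.filter (fun r => r.2.2 == v)).length : Int) := by
  have h := List.foldl_map (f := fun p : String × (String × String) => p.2.2)
      (g := fun d x => d.insert x (d.getD x 0 + 1)) (l := all_nodes)
      (init := (PySem.Dict.empty : PySem.Dict String Int))
  rw [← h, PySem.Dict.getD_foldl_insert_add_one]
  simp [List.count_eq_countP, List.countP_eq_length_filter, List.filter_map]
  rfl

lemma a_items (all_nodes : List (String × (String × String))) (hnd : all_nodes.Nodup) :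
    create_name_mapping_py all_nodes
      = all_nodes.map (fun q => (q.1, q.2, pvName all_nodes q)) := by
  simp only [create_name_mapping_py]
  rw [List.foldl_ext _ (fun m p => m.insert p (pvName all_nodes p)) _
    (by
      intro m p _
      simp only [a_counts]
      unfold pvName
      by_cases h2 : 2 ≤ (all_nodes.filter (fun r => r.2.2 == p.2.2)).length
      · rw [if_pos (by exact_mod_cast h2), if_pos h2]
      · rw [if_neg (by omega), if_neg h2])]
  rw [items_foldl_insert_fun all_nodes _ _ (by intro q _; simp) hnd]
  have he : (PySem.Dict.empty : PySem.Dict (String × (String × String)) String).items = [] := rfl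
  simp [he, Function.comp]

lemma b_inv (l pre : List (String × (String × String)))
    (m : PySem.Dict (String × (String × String)) String)
    (fo : PySem.Dict String (Option (String × (String × String))))
    (hnd : (pre ++ l).Nodup)
    (h1 : m.items = pre.map (fun q => (q, pvName pre q)))
    (h2 : ∀ k, fo.get? k = pvFState pre k) :
    (l.foldl
      (fun (st : PySem.Dict (String × (String × String)) String ×
                 PySem.Dict String (Option (String × (String × String)))) p =>
        match st.2.get? p.2.2 with
        | none => (st.1.insert p p.2.2, st.2.insert p.2.2 (some p))
        | some (some prev) =>
            ((st.1.insert prev (prev.2.1 ++ "_" ++ prev.2.2)).insert p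
               (p.2.1 ++ "_" ++ p.2.2),
             st.2.insert p.2.2 none)
        | some none => (st.1.insert p (p.2.1 ++ "_" ++ p.2.2), st.2))
      (m, fo)).1.items
      = (pre ++ l).map (fun q => (q, pvName (pre ++ l) q)) := by
  induction l generalizing pre m fo with
  | nil => simpa using h1
  | cons p t ih =>
    have hkeys : m.keys = pre := by
      have hk : m.keys = m.items.map Prod.fst := rfl
      rw [hk, h1, List.map_map]; simp [Function.comp_def]
    have hp_pre : p ∉ pre := fun hmem => (List.disjoint_of_nodup_append hnd) hmem (by simp)
    have hass : pre ++ p :: t = (pre ++ [p]) ++ t := by simp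
    have hnd' : ((pre ++ [p]) ++ t).Nodup := by rw [← hass]; exact hnd
    have hcontp : m.contains p = false := by
      cases hc : m.contains p with
      | true => exact absurd (hkeys ▸ (PySem.Dict.contains_iff_mem_keys m p).mp hc) hp_pre
      | false => rfl
    have hfp : List.filter (fun r => r.2.2 == p.2.2) (pre ++ [p])
        = List.filter (fun r => r.2.2 == p.2.2) pre ++ [p] := by
      simp [List.filter_append]
    rw [List.foldl_cons, hass]
    have hstep := h2 p.2.2
    unfold pvFState at hstep
    dsimp only
    cases hfl : List.filter (fun r => r.2.2 == p.2.2) pre with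
    | nil =>
      have hfresh : ∀ q ∈ pre, ¬ q.2.2 = p.2.2 := by
        intro q hq he
        have hmf : q ∈ List.filter (fun r => r.2.2 == p.2.2) pre :=
          List.mem_filter.mpr ⟨hq, by simp [he]⟩
        rw [hfl] at hmf; exact absurd hmf (by simp)
      rw [hfl] at hstep; simp at hstep
      rw [hstep]
      have hnamep : pvName (pre ++ [p]) p = p.2.2 := by
        unfold pvName; rw [hfp, hfl]; simp
      exact ih (pre ++ [p]) _ _ hnd'
        (by
          rw [PySem.Dict.items_insert_of_not_contains m _ hcontp, h1, List.map_append]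
          congr 1
          · exact List.map_congr_left fun q hq => by
              rw [pvName_stable pre p q (hfresh q hq)]
          · simp [hnamep])
        (by
          intro k
          by_cases hk : k = p.2.2
          · subst hk; rw [PySem.Dict.get?_insert_self]
            unfold pvFState; rw [hfp, hfl]; simp
          · rw [PySem.Dict.get?_insert_of_ne _ _ hk, h2 k,
              pvFState_stable pre p k (fun e => hk e.symm)])
    | cons q0 rest =>
      have hq0 : q0 ∈ List.filter (fun r => r.2.2 == p.2.2) pre := by rw [hfl]; simp
      have hq0pre : q0 ∈ pre := (List.mem_filter.mp hq0).1
      have hq0key : q0.2.2 = p.2.2 := by simpa using (List.mem_filter.mp hq0).2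
      have hnotkey : ∀ q ∈ pre, q ∉ List.filter (fun r => r.2.2 == p.2.2) pre →
          ¬ q.2.2 = p.2.2 := by
        intro q hq hnm he
        exact hnm (List.mem_filter.mpr ⟨hq, by simp [he]⟩)
      cases rest with
      | nil =>
        -- exactly one earlier node shares the model name: rename it retroactively
        have honly : ∀ q ∈ pre, q ≠ q0 → ¬ q.2.2 = p.2.2 := by
          intro q hq hne he
          have hmf : q ∈ List.filter (fun r => r.2.2 == p.2.2) pre :=
            List.mem_filter.mpr ⟨hq, by simp [he]⟩
          rw [hfl] at hmf; simp at hmf; exact hne hmf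
        rw [hfl] at hstep; simp at hstep
        rw [hstep]
        have hcontq0 : m.contains q0 = true :=
          (PySem.Dict.contains_iff_mem_keys m q0).mpr (hkeys ▸ hq0pre)
        have hpq0 : p ≠ q0 := fun e => hp_pre (e ▸ hq0pre)
        have hnameq0 : pvName (pre ++ [p]) q0 = q0.2.1 ++ "_" ++ q0.2.2 := by
          unfold pvName
          rw [hq0key, hfp, hfl]; simp
        have hnamep : pvName (pre ++ [p]) p = p.2.1 ++ "_" ++ p.2.2 := by
          unfold pvName; rw [hfp, hfl]; simp
        exact ih (pre ++ [p]) _ _ hnd'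
          (by
            rw [PySem.Dict.items_insert_of_not_contains _ _
                  (by rw [PySem.Dict.contains_insert]; simp [hpq0, hcontp]),
                PySem.Dict.items_insert_of_contains m _ hcontq0, h1,
                List.map_append, List.map_map]
            congr 1
            · refine List.map_congr_left fun q hq => ?_
              by_cases hqq : q = q0
              · subst hqq
                simp [hnameq0]
              · have : (q == q0) = false := by simpa using hqq
                simp only [Function.comp_def, this]
                simp only [Bool.false_eq_true, if_false]
                rw [pvName_stable pre p q (honly q hq hqq)]
            · simp [hnamep])
          (by
            intro k
            by_cases hk : k = p.2.2
            · subst hk; rw [PySem.Dict.get?_insert_self]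
              unfold pvFState; rw [hfp, hfl]; simp
            · rw [PySem.Dict.get?_insert_of_ne _ _ hk, h2 k,
                pvFState_stable pre p k (fun e => hk e.symm)])
      | cons q1 rest' =>
        -- the model name is already ambiguous: everyone with it is already long-named
        rw [hfl] at hstep; simp at hstep
        rw [hstep]
        have hnamep : pvName (pre ++ [p]) p = p.2.1 ++ "_" ++ p.2.2 := by
          unfold pvName; rw [hfp, hfl]; simp
        exact ih (pre ++ [p]) _ _ hnd'
          (by
            rw [PySem.Dict.items_insert_of_not_contains m _ hcontp, h1, List.map_append]
            congr 1
            · refine List.map_congr_left fun q hq => ?_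
              by_cases hqk : q.2.2 = p.2.2
              · have hlong1 : pvName pre q = q.2.1 ++ "_" ++ q.2.2 := by
                  unfold pvName; rw [hqk, hfl]; simp
                have hlong2 : pvName (pre ++ [p]) q = q.2.1 ++ "_" ++ q.2.2 := by
                  unfold pvName; rw [hqk, hfp, hfl]; simp
                rw [hlong1, hlong2]
              · rw [pvName_stable pre p q hqk]
            · simp [hnamep])
          (by
            intro k
            by_cases hk : k = p.2.2
            · subst hk
              rw [h2 p.2.2]
              unfold pvFState
              rw [hfp, hfl]; simp
            · rw [h2 k, pvFState_stable pre p k (fun e => hk e.symm)])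

lemma b_items (all_nodes : List (String × (String × String)))
    (hnd : all_nodes.Nodup) :
    create_name_mapping_py_alt all_nodes
      = all_nodes.map (fun q => (q.1, q.2, pvName all_nodes q)) := by
  simp only [create_name_mapping_py_alt]
  rw [b_inv all_nodes [] PySem.Dict.empty PySem.Dict.empty (by simpa using hnd) rfl
    (by intro k; rw [PySem.Dict.get?_empty]; unfold pvFState; simp)]
  simp [Function.comp]

-- ===== VERDICT (by name: the statement is the Claim_ definition above) =====
theorem create_name_mapping_py_spec : Claim_equal_create_name_mapping_py := by
  intro all_nodes _ hpre
  unfold Spec_create_name_mapping_py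
  rw [a_items all_nodes hpre, b_items all_nodes hpre]
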